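-- pv_equiv track=rewrite | github.com/piotrmludzik/Keymaker | keymaker.py | get_square_index_chars
-- ===== SOURCE A (Python) =====
-- def get_square_index_chars(word: str) -> str:
--     """
--     Returns all characters of word laying at square number indices.
--
--         get_square_index_chars('abcdefghijklm'), returns:
--         'abej'
--     """
--     returned_string = ""
--     letter_index, square_number = 0, 0
--
--     while square_number < len(word):
--         returned_string += word[square_number]
--         letter_index += 1
--         square_number = letter_index * letter_index
--
--     return returned_string
-- ===== SOURCE B (Python) =====
-- def get_square_index_chars(word: str) -> str:
--     out = []
--     root = 0
--     for i, c in enumerate(word):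
--         if i == root * root:
--             out.append(c)
--             root += 1
--     return ''.join(out)
-- ===== Notes on version B (the rewrite author's own statement) =====
-- stated objective: alternative
-- what changed: Instead of stepping through the square indices by random access and growing a string with +=, B makes a single pass over enumerate(word) keeping a running next-root counter and joins the collected characters.
import Mathlib
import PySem

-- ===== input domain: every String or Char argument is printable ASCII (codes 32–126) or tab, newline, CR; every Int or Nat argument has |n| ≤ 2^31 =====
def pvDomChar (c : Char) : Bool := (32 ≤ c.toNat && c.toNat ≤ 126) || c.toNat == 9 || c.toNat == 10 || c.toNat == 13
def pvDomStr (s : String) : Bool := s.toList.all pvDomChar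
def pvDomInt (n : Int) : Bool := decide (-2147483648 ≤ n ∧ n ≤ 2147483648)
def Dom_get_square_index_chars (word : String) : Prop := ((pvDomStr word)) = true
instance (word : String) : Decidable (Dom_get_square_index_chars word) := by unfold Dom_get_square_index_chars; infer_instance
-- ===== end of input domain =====

-- B replaces A's walk along the square indices by one pass over all indexed characters
-- with a running next-root counter (objective: alternative, same cost).

-- termination helper for the square-walking loop
theorem pv_le_sq (i : Nat) : i ≤ i * i := by
  cases i with
  | zero => exact Nat.le_refl 0
  | succ n => exact Nat.le_mul_of_pos_left _ (Nat.succ_pos n)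

-- ===== PORT A =====
-- while square_number < len(word): returned_string += word[square_number]; letter_index += 1; square_number = letter_index**2
def loopA (w : List Char) (i : Nat) (acc : List Char) : List Char :=
  if h : i * i < w.length then loopA w (i + 1) (acc ++ [w[i * i]]) else acc
termination_by w.length - i
decreasing_by
  have hi : i ≤ i * i := pv_le_sq i
  omega

def get_square_index_chars (word : String) : String :=
  String.ofList (loopA word.toList 0 [])

-- ===== PORT B =====
-- for i, c in enumerate(word): if i == root*root: out.append(c); root += 1;  return ''.join(out)
def get_square_index_chars_alt (word : String) : String :=
  String.ofList
    ((PySem.List.enumerate word.toList 0).foldl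
      (fun (p : List Char × Nat) (ic : Int × Char) =>
        if ic.1 == (p.2 : Int) * (p.2 : Int) then (p.1 ++ [ic.2], p.2 + 1) else p)
      ([], 0)).1

-- ===== PRECONDITION & SPEC =====
def Spec_get_square_index_chars (word : String) (out : String) : Prop := out = get_square_index_chars_alt word
instance (word : String) (out : String) : Decidable (Spec_get_square_index_chars word out) := by unfold Spec_get_square_index_chars; infer_instance

-- ===== CLAIM (what is proved, stated in full; the proofs are below) =====
def Claim_equal_get_square_index_chars : Prop := ∀ (word : String), Dom_get_square_index_chars word → Spec_get_square_index_chars word (get_square_index_chars word)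

-- ===== LEMMAS AND PROOFS =====

-- proof-side helper: A's loop without its accumulator
def sqGo (w : List Char) (i : Nat) : List Char :=
  if h : i * i < w.length then w[i * i] :: sqGo w (i + 1) else []
termination_by w.length - i
decreasing_by
  have hi : i ≤ i * i := pv_le_sq i
  omega

-- proof-side helper: B's fold as structural recursion on the remaining characters,
-- j = absolute index of the head, state (acc, r)
def collectS (xs : List Char) (j : Nat) (st : List Char × Nat) : List Char × Nat :=
  match xs, st with
  | [], st => st
  | x :: xs, (acc, r) =>
    if j = r * r then collectS xs (j + 1) (acc ++ [x], r + 1) else collectS xs (j + 1) (acc, r)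

theorem loopA_eq_go (w : List Char) (i : Nat) (acc : List Char) :
    loopA w i acc = acc ++ sqGo w i := by
  by_cases h : i * i < w.length
  · rw [loopA, sqGo]
    simp only [h, dif_pos]
    rw [loopA_eq_go w (i + 1)]
    simp
  · rw [loopA, sqGo]
    simp [h]
termination_by w.length - i
decreasing_by
  have hi : i ≤ i * i := pv_le_sq i
  omega

theorem fold_eq_collectS (xs : List Char) (j : Nat) (st : List Char × Nat) :
    (PySem.List.enumerate xs (j : Int)).foldl
      (fun (p : List Char × Nat) (ic : Int × Char) =>
        if ic.1 == (p.2 : Int) * (p.2 : Int) then (p.1 ++ [ic.2], p.2 + 1) else p)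
      st = collectS xs j st := by
  induction xs generalizing j st with
  | nil => simp [PySem.List.enumerate_nil, collectS]
  | cons x xs ih =>
    obtain ⟨acc, r⟩ := st
    rw [PySem.List.enumerate_cons]
    simp only [List.foldl_cons, collectS]
    have hstep : ((j : Int) + 1) = ((j + 1 : Nat) : Int) := by push_cast; ring
    by_cases hjr : j = r * r
    · have hb : ((j : Int) == (r : Int) * (r : Int)) = true := by
        simp [hjr]
      simp only [hb, if_true, if_pos hjr]
      rw [hstep, ih]
    · have hb : ((j : Int) == (r : Int) * (r : Int)) = false := by
        simp only [beq_eq_false_iff_ne, ne_eq]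
        intro hh
        exact hjr (by exact_mod_cast hh)
      simp only [hb, Bool.false_eq_true, if_false, if_neg hjr]
      rw [hstep, ih]

theorem collectS_fst (xs : List Char) (j : Nat) (acc : List Char) (r : Nat) :
    (collectS xs j (acc, r)).1 = acc ++ (collectS xs j ([], r)).1 := by
  induction xs generalizing j acc r with
  | nil => simp [collectS]
  | cons x xs ih =>
    simp only [collectS]
    by_cases hjr : j = r * r
    · rw [if_pos hjr, if_pos hjr, ih (j + 1) (acc ++ [x]) (r + 1), ih (j + 1) ([] ++ [x]) (r + 1)]
      simp
    · rw [if_neg hjr, if_neg hjr, ih (j + 1) acc r]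

theorem collectS_eq_go (w : List Char) (xs : List Char) (j r : Nat)
    (hdrop : xs = w.drop j) (hjr : j ≤ r * r) :
    (collectS xs j ([], r)).1 = sqGo w r := by
  induction xs generalizing j r with
  | nil =>
    have hlen : w.length ≤ j := by
      by_contra hc
      have hne : w.drop j ≠ [] := by
        simp only [ne_eq, List.drop_eq_nil_iff]
        omega
      exact hne hdrop.symm
    rw [sqGo]
    have : ¬ r * r < w.length := by omega
    simp [this, collectS]
  | cons x xs ih =>
    have hj : j < w.length := by
      by_contra hc
      have hnil : w.drop j = [] := by
        simp only [List.drop_eq_nil_iff]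
        omega
      rw [hnil] at hdrop
      exact List.cons_ne_nil x xs hdrop
    have hcons : x :: xs = w[j] :: w.drop (j + 1) := by
      rw [hdrop]
      exact List.drop_eq_getElem_cons hj
    have hx : x = w[j] := (List.cons.injEq _ _ _ _ ▸ hcons).1
    have hxs : xs = w.drop (j + 1) := (List.cons.injEq _ _ _ _ ▸ hcons).2
    simp only [collectS]
    by_cases he : j = r * r
    · subst he
      rw [if_pos rfl, collectS_fst, ih (r * r + 1) (r + 1) hxs (by nlinarith)]
      conv_rhs => rw [sqGo]
      simp [hj, hx]
    · rw [if_neg he]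
      exact ih (j + 1) r hxs (by omega)

-- ===== VERDICT (by name: the statement is the Claim_ definition above) =====
theorem get_square_index_chars_spec : Claim_equal_get_square_index_chars := by
  intro word _
  unfold Spec_get_square_index_chars get_square_index_chars get_square_index_chars_alt
  rw [loopA_eq_go]
  have h0 : (0 : Int) = ((0 : Nat) : Int) := rfl
  rw [h0, fold_eq_collectS]
  rw [collectS_eq_go word.toList word.toList 0 0 (by simp) (by omega)]
  simp
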